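-- pv_equiv track=rewrite | github.com/jimaginary/ELECHONS | elechons/models/spatial_methods.py | get_largest_backfill
-- ===== SOURCE A (Python) =====
-- def get_largest_backfill(v):
--         l = 0
--         s = 0
--         for i in v:
--             if (not i):
--                 s += 1
--                 l = max(s, l)
--             else:
--                 s = 0
--         return l
-- ===== SOURCE B (Python) =====
-- def get_largest_backfill(v):
--     # partition v into maximal same-truthiness runs with two indices,
--     # keep the best length among falsy runs
--     best = 0
--     i, n = 0, len(v)
--     while i < n:
--         j = i
--         while j < n and (not v[j]) == (not v[i]):
--             j += 1
--         if not v[i]: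
--             best = max(best, j - i)
--         i = j
--     return best
-- ===== Notes on version B (the rewrite author's own statement) =====
-- stated objective: alternative
-- what changed: B partitions the list into maximal same-truthiness runs (two-pointer run scan) and maximizes over the falsy runs' lengths, instead of threading a running counter and best-so-far through a flat element-by-element loop.
import Mathlib
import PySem

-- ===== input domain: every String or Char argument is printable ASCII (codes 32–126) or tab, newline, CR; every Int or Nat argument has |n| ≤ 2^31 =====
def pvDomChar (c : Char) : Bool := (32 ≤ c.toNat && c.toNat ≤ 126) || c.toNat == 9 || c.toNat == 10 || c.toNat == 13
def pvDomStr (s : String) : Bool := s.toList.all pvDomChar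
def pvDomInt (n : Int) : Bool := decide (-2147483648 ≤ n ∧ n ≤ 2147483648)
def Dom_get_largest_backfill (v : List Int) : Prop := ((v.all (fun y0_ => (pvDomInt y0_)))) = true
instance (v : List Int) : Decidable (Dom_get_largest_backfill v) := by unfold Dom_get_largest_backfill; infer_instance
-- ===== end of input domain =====

-- B replaces A's flat loop (running counter + best-so-far) by a two-pointer scan over
-- maximal same-truthiness runs, maximizing over the falsy runs' lengths (alternative decomposition).

-- ===== PORT A =====
-- state (l, s); 'not i' on a Python int means i == 0
def get_largest_backfill (v : List Int) : Int :=
  (v.foldl (fun (ls : Int × Int) i =>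
      if i == 0 then (max (ls.2 + 1) ls.1, ls.2 + 1) else (ls.1, 0)) (0, 0)).1

-- ===== PORT B =====
-- inner while loop of Source B: consume the maximal prefix whose truthiness equals k,
-- returning its length and the remaining suffix
def pvTakeRun (k : Bool) : List Int → Int × List Int
  | [] => (0, [])
  | x :: xs =>
    if (x == 0) == k then
      let p := pvTakeRun k xs
      (p.1 + 1, p.2)
    else (0, x :: xs)

theorem pvTakeRun_len (k : Bool) : ∀ (xs : List Int), (pvTakeRun k xs).2.length ≤ xs.length := by
  intro xs
  induction xs with
  | nil => simp [pvTakeRun]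
  | cons x xs ih =>
    simp only [pvTakeRun]
    split
    · exact Nat.le_succ_of_le ih
    · exact Nat.le_refl _

-- outer while loop of Source B: run by run, updating best on falsy runs
def pvAltGo (best : Int) : List Int → Int
  | [] => best
  | x :: xs =>
    let k := x == 0
    let p := pvTakeRun k xs
    pvAltGo (if k then max best (p.1 + 1) else best) p.2
termination_by v => v.length
decreasing_by
  exact Nat.lt_succ_of_le (pvTakeRun_len _ _)

def get_largest_backfill_alt (v : List Int) : Int := pvAltGo 0 v

-- ===== PRECONDITION & SPEC =====
def Spec_get_largest_backfill (v : List Int) (out : Int) : Prop := out = get_largest_backfill_alt v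
instance (v : List Int) (out : Int) : Decidable (Spec_get_largest_backfill v out) := by unfold Spec_get_largest_backfill; infer_instance

-- ===== CLAIM (what is proved, stated in full; the proofs are below) =====
def Claim_equal_get_largest_backfill : Prop := ∀ (v : List Int), Dom_get_largest_backfill v → Spec_get_largest_backfill v (get_largest_backfill v)

-- ===== LEMMAS AND PROOFS =====

-- reference function: longest zero-run of v, given that a zero-run of length s is open just before v
def pvG : List Int → Int → Int
  | [], _ => 0
  | x :: xs, s => if x == 0 then max (s + 1) (pvG xs (s + 1)) else pvG xs 0

theorem pvFoldA_eq (v : List Int) : ∀ (l s : Int), 0 ≤ l →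
    (v.foldl (fun (ls : Int × Int) i =>
      if i == 0 then (max (ls.2 + 1) ls.1, ls.2 + 1) else (ls.1, 0)) (l, s)).1
    = max l (pvG v s) := by
  induction v with
  | nil => intro l s hl; simp [pvG]; omega
  | cons x xs ih =>
    intro l s hl
    by_cases hx : x = 0
    · subst hx
      simp only [List.foldl_cons, pvG, beq_self_eq_true, if_true]
      rw [ih (max (s + 1) l) (s + 1) (by omega)]
      omega
    · have hb : (x == 0) = false := by simpa using hx
      simp only [List.foldl_cons, pvG, hb, Bool.false_eq_true, if_false]
      exact ih l 0 hl

-- a maximal zero-run at the front of xs, continuing an open run of length s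
theorem pvG_true (xs : List Int) : ∀ (s : Int), 0 ≤ s →
    max s (pvG xs s) = max (s + (pvTakeRun true xs).1) (pvG (pvTakeRun true xs).2 0) := by
  induction xs with
  | nil => intro s hs; simp [pvTakeRun, pvG]
  | cons x xs ih =>
    intro s hs
    by_cases hx : x = 0
    · subst hx
      have h := ih (s + 1) (by omega)
      simp only [pvTakeRun, pvG, beq_self_eq_true, if_true] at h ⊢
      omega
    · have hb : (x == 0) = false := by simpa using hx
      simp [pvTakeRun, pvG, hb]

-- skipping a maximal nonzero-run at the front does not change pvG · 0
theorem pvG_false (xs : List Int) : pvG xs 0 = pvG (pvTakeRun false xs).2 0 := by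
  induction xs with
  | nil => simp [pvTakeRun]
  | cons x xs ih =>
    by_cases hx : x = 0
    · subst hx
      simp [pvTakeRun, pvG]
    · have hb : (x == 0) = false := by simpa using hx
      simpa [pvTakeRun, pvG, hb] using ih

theorem pvAltGo_eq : ∀ (n : Nat) (v : List Int), v.length ≤ n → ∀ (best : Int), 0 ≤ best →
    pvAltGo best v = max best (pvG v 0) := by
  intro n
  induction n with
  | zero =>
    intro v hv best hb
    have : v = [] := List.eq_nil_of_length_eq_zero (Nat.le_zero.mp hv)
    subst this
    simp [pvAltGo, pvG]; omega
  | succ n ih =>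
    intro v hv best hb
    match v with
    | [] => simp [pvAltGo, pvG]; omega
    | x :: xs =>
      rw [pvAltGo]
      have hlen : (pvTakeRun (x == 0) xs).2.length ≤ n := by
        have := pvTakeRun_len (x == 0) xs
        simp at hv
        omega
      by_cases hx : x = 0
      · subst hx
        simp only [beq_self_eq_true] at hlen
        simp only [beq_self_eq_true, if_true]
        rw [ih _ hlen _ (by omega)]
        have h1 := pvG_true xs 1 (by omega)
        have h2 : pvG (0 :: xs) 0 = max 1 (pvG xs 1) := by simp [pvG]
        rw [h2]
        omega
      · have hb0 : (x == 0) = false := by simpa using hx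
        simp only [hb0] at hlen
        simp only [hb0, Bool.false_eq_true, if_false]
        rw [ih _ hlen best hb]
        have h2 : pvG (x :: xs) 0 = pvG xs 0 := by
          simp [pvG, hb0]
        rw [h2, pvG_false xs]

-- ===== VERDICT (by name: the statement is the Claim_ definition above) =====
theorem get_largest_backfill_spec : Claim_equal_get_largest_backfill := by
  intro v _
  unfold Spec_get_largest_backfill get_largest_backfill get_largest_backfill_alt
  rw [pvFoldA_eq v 0 0 le_rfl, pvAltGo_eq v.length v le_rfl 0 le_rfl]
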